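-- pv_equiv track=rewrite | github.com/RahulARanger/My_Python_Book | Basics/Arrays/n_bonacci.py | n_bonacci
-- ===== SOURCE A (Python) =====
-- def n_bonacci(n, m):
--     result = [0 for _ in range(n - 1)]
--     result.append(1)
--
--     pinned = 0
--     current = 1
--
--     for _ in range(n, m):
--         result.append(current)
--
--         current += result[-1]
--         current -= result[pinned]
--         pinned += 1
--
--     return result
-- ===== SOURCE B (Python) =====
-- def n_bonacci(n, m):
--     result = [0] * (n - 1)
--     result.append(1)
--     w = len(result)  # window width (NOT n: handles n <= 0 like A)
--     for _ in range(n, m):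
--         result.append(sum(result[-w:]))
--     return result
-- ===== Notes on version B (the rewrite author's own statement) =====
-- stated objective: simpler
-- what changed: Replaces A's sliding-window accumulator (running 'current' plus a pinned index into the list) with a direct per-term summation of the last w elements, where w is the initial prefix length.
import Mathlib
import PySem

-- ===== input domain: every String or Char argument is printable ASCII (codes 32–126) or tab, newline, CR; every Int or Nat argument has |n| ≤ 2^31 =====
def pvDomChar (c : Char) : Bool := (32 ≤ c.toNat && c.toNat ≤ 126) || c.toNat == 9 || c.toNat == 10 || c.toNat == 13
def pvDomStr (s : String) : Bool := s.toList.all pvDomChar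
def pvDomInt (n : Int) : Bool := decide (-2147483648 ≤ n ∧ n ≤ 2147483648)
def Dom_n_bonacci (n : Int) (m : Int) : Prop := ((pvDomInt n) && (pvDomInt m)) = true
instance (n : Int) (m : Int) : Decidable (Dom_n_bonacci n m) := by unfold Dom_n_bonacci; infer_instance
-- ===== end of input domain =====

-- B recomputes each term as the sum of the last w elements (w = initial prefix length),
-- replacing A's running accumulator with a pinned index; simpler, not faster.

-- ===== PORT A =====
-- one loop iteration of A: append current, then slide the window sum
-- (result[-1] and result[pinned] are always in range along A's run — proved in loopA_eq_loopB below; default 0 is unreachable)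
def nBonacciStepA (st : List Int × Int × Int) (_i : Int) : List Int × Int × Int :=
  let result := st.1 ++ [st.2.2]
  let current := st.2.2 + PySem.List.pyGetD result (-1) 0 - PySem.List.pyGetD result st.2.1 0
  (result, st.2.1 + 1, current)

def n_bonacci (n : Int) (m : Int) : List Int :=
  let result := ((PySem.List.pyRange 0 (n - 1) 1).map (fun _ => (0 : Int))) ++ [1]
  ((PySem.List.pyRange n m 1).foldl nBonacciStepA (result, 0, 1)).1

-- ===== PORT B =====
def n_bonacci_alt (n : Int) (m : Int) : List Int :=
  let result := PySem.List.pyRepeat [(0 : Int)] (n - 1) ++ [1]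
  let w : Int := result.length
  (PySem.List.pyRange n m 1).foldl
    (fun r _ => r ++ [(PySem.List.slice r (some (-w)) none).sum]) result

-- ===== PRECONDITION & SPEC =====
def Spec_n_bonacci (n : Int) (m : Int) (out : List Int) : Prop := out = n_bonacci_alt n m
instance (n : Int) (m : Int) (out : List Int) : Decidable (Spec_n_bonacci n m out) := by unfold Spec_n_bonacci; infer_instance

-- ===== CLAIM (what is proved, stated in full; the proofs are below) =====
def Claim_equal_n_bonacci : Prop := ∀ (n : Int) (m : Int), Dom_n_bonacci n m → Spec_n_bonacci n m (n_bonacci n m)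

-- ===== LEMMAS AND PROOFS =====

-- Invariant: along A's loop, pinned = result.length - w and current = sum of the last w elements,
-- so A's fold tracks exactly B's fold (w = initial list length, 1 ≤ w ≤ result.length throughout).
lemma loopA_eq_loopB (wn : Nat) (hw : 1 ≤ wn) (L : List Int) :
    ∀ (r : List Int), wn ≤ r.length →
      (L.foldl nBonacciStepA (r, ((r.length : Int) - (wn : Int)), (r.drop (r.length - wn)).sum)).1
      = L.foldl (fun r _ => r ++ [(PySem.List.slice r (some (-(wn : Int))) none).sum]) r := by
  induction L with
  | nil => intro r _; rfl
  | cons x L ih =>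
    intro r hr
    have hlen : wn ≤ r.length := hr
    have hlt : r.length - wn < r.length := by omega
    set c : Int := (r.drop (r.length - wn)).sum with hc
    -- B's appended element is exactly c
    have hslice : PySem.List.slice r (some (-(wn : Int))) none = r.drop (r.length - wn) :=
      PySem.List.slice_from_neg_natCast r wn hw
    -- A's step on the invariant state
    have hp0 : (0 : Int) ≤ (r.length : Int) - (wn : Int) := by
      have := hlen; omega
    have hstep : nBonacciStepA (r, ((r.length : Int) - (wn : Int)), c) x
        = (r ++ [c], ((r.length : Int) - (wn : Int)) + 1,
           c + c - r[r.length - wn]) := by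
      unfold nBonacciStepA
      have h1 : PySem.List.pyGetD (r ++ [c]) (-1) 0 = c :=
        PySem.List.pyGetD_neg_one_append_singleton r c 0
      have h2 : PySem.List.pyGetD (r ++ [c]) ((r.length : Int) - (wn : Int)) 0
          = r[r.length - wn] := by
        have hlen2 : (r ++ [c]).length = r.length + 1 := by simp
        have hlt2 : (r.length : Int) - (wn : Int) < ((r ++ [c]).length : Int) := by
          rw [hlen2]; omega
        rw [PySem.List.pyGetD_eq_getElem (r ++ [c]) 0 hp0 hlt2]
        have ht : ((r.length : Int) - (wn : Int)).toNat = r.length - wn := by omega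
        simp only [ht]
        exact List.getElem_append_left hlt
      simp only [h1, h2]
    rw [List.foldl_cons, List.foldl_cons, hstep, hslice, ← hc]
    -- massage the new state into the invariant shape for r' = r ++ [c]
    have hlen' : wn ≤ (r ++ [c]).length := by simp; omega
    have e1 : (((r ++ [c]).length : Int) - (wn : Int)) = ((r.length : Int) - (wn : Int)) + 1 := by
      simp; omega
    have e2 : ((r ++ [c]).drop ((r ++ [c]).length - wn)).sum = c + c - r[r.length - wn] := by
      have hk : (r ++ [c]).length - wn = (r.length - wn) + 1 := by simp; omega
      rw [hk]
      have hd : (r ++ [c]).drop ((r.length - wn) + 1)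
          = r.drop ((r.length - wn) + 1) ++ [c] := by
        rw [List.drop_append_of_le_length (by omega)]
      rw [hd, List.sum_append]
      have hcons : r.drop (r.length - wn) = r[r.length - wn] :: r.drop ((r.length - wn) + 1) :=
        List.drop_eq_getElem_cons hlt
      have : c = r[r.length - wn] + (r.drop ((r.length - wn) + 1)).sum := by
        rw [hc, hcons, List.sum_cons]
      simp [this]; ring
    rw [← e1, ← e2] at *
    exact ih (r ++ [c]) hlen'

-- the two initial prefixes coincide
lemma init_eq (n : Int) :
    ((PySem.List.pyRange 0 (n - 1) 1).map (fun _ => (0 : Int))) ++ [1]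
    = PySem.List.pyRepeat [(0 : Int)] (n - 1) ++ [1] := by
  rw [PySem.List.pyRepeat_singleton]
  congr 1
  rw [List.map_const']
  congr 1
  rw [PySem.List.length_pyRange_one]
  omega

-- ===== VERDICT (by name: the statement is the Claim_ definition above) =====
theorem n_bonacci_spec : Claim_equal_n_bonacci := by
  intro n m _
  unfold Spec_n_bonacci n_bonacci n_bonacci_alt
  rw [init_eq n]
  set r0 : List Int := PySem.List.pyRepeat [(0 : Int)] (n - 1) ++ [1] with hr0
  have hw : 1 ≤ r0.length := by simp [hr0]
  have hsum : r0.sum = 1 := by simp [hr0, PySem.List.pyRepeat_singleton]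
  have h := loopA_eq_loopB r0.length hw (PySem.List.pyRange n m 1) r0 le_rfl
  simpa [hsum] using h
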